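-- pv_equiv track=rewrite | github.com/standenboy/school | comp/work/28/1.py | addative
-- ===== SOURCE A (Python) =====
-- def addative(num):
--     if len(num) >= 2:
--         new = 0
--         for i in num:
--             new = new + int(i)
--         return 1 + addative(str(new))
--     else:
--         return 0
-- ===== SOURCE B (Python) =====
-- _DIGITS = "0123456789"
--
-- def addative(num):
--     # Additive persistence, iteratively: one pass turns the digit characters
--     # into a number's digit sum (ValueError on a non-digit, as in A), after
--     # which each further step is pure arithmetic on the integer (% 10, // 10)
--     # -- no further strings are built and no recursion is used.
--     if len(num) < 2:
--         return 0
--     total = 0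
--     for c in num:
--         total += _DIGITS.index(c)
--     count = 1
--     while total >= 10:
--         s = 0
--         while total > 0:
--             s += total % 10
--             total //= 10
--         total = s
--         count += 1
--     return count
-- ===== Notes on version B (the rewrite author's own statement) =====
-- stated objective: alternative
-- what changed: Replaces A's recursion on freshly built digit strings (str(new) each round) with an iterative count: one pass converts the characters to digit values via a digit-table index, and every later persistence step reduces the integer purely arithmetically with % 10 and // 10, never constructing another string and never recursing.
import Mathlib
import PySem

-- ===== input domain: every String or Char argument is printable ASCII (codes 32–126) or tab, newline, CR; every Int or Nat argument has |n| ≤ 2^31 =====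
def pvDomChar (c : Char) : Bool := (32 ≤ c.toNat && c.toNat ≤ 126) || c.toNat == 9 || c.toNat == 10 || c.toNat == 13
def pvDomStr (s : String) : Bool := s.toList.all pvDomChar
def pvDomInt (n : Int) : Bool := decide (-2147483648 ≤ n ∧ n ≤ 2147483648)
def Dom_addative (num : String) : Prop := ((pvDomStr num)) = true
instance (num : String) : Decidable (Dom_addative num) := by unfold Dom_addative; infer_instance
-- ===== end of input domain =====

-- B replaces A's recursion on freshly built digit strings by an iterative count: one pass maps
-- the digit characters through a digit table, then every further step is integer arithmetic
-- (% 10, // 10); same return value on Pre_ (digit strings or length < 2).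


-- ===== PORT A =====
-- int(i) for a one-character string i; the `none` (ValueError) case is excluded by Pre_addative.
def pyDigitInt (c : Char) : Int := (PySem.Int.ofChars? [c]).getD 0

-- `new = 0; for i in num: new = new + int(i)` — A's digit-sum pass over the string.
def digitSum (cs : List Char) : Int := cs.foldl (fun acc c => acc + pyDigitInt c) 0

-- helper lemmas needed by the termination arguments of the ports (cited in decreasing_by)
theorem bindCast_nonneg (o : Option Nat) (v : Int)
    (h : (do let a ← o; pure ((a : Int))) = some v) : 0 ≤ v := by
  cases o with
  | none => cases h
  | some b =>
    obtain rfl : ((b : Int)) = v := Option.some.inj h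
    positivity

theorem ofChars?_single_nonneg (c : Char) (v : Int)
    (h : PySem.Int.ofChars? [c] = some v) : 0 ≤ v := by
  by_cases h1 : c = '-'
  · subst h1
    have hn : PySem.Int.ofChars? ['-'] = none := by decide
    rw [hn] at h; cases h
  by_cases h2 : c = '+'
  · subst h2
    have hn : PySem.Int.ofChars? ['+'] = none := by decide
    rw [hn] at h; cases h
  unfold PySem.Int.ofChars? at h
  generalize hX : (List.dropWhile PySem.Int.isIntSpace (List.dropWhile PySem.Int.isIntSpace [c]).reverse).reverse = cs at h
  have hcs : cs = [] ∨ cs = [c] := by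
    by_cases hs : PySem.Int.isIntSpace c = true
    · left; rw [← hX]; simp [List.dropWhile, hs]
    · right; rw [← hX]; simp [List.dropWhile, hs]
  rcases hcs with rfl | rfl
  · simp only [Option.map_eq_some_iff] at h
    obtain ⟨a, ha, rfl⟩ := h
    exact bindCast_nonneg _ _ ha
  · dsimp only [] at h
    split at h
    · rename_i ds heq
      rw [List.cons.injEq] at heq
      exact absurd heq.1 h1
    · rename_i ds heq
      rw [List.cons.injEq] at heq
      exact absurd heq.1 h2
    · simp only [Option.map_eq_some_iff] at h
      obtain ⟨a, ha, rfl⟩ := h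
      exact bindCast_nonneg _ _ ha

theorem pyDigitInt_nonneg (c : Char) : 0 ≤ pyDigitInt c := by
  unfold pyDigitInt
  cases h : PySem.Int.ofChars? [c] with
  | none => simp
  | some v => simpa using ofChars?_single_nonneg c v h

theorem foldl_digit_init (l : List Char) (a : Int) :
    l.foldl (fun acc c => acc + pyDigitInt c) a = a + l.foldl (fun acc c => acc + pyDigitInt c) 0 := by
  induction l generalizing a with
  | nil => simp
  | cons c l ih =>
    simp only [List.foldl]
    rw [ih (a + pyDigitInt c), ih (0 + pyDigitInt c)]
    ring

theorem digitSum_cons (c : Char) (l : List Char) :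
    digitSum (c :: l) = pyDigitInt c + digitSum l := by
  unfold digitSum
  simp only [List.foldl]
  rw [foldl_digit_init]
  ring

theorem digitSum_nonneg (cs : List Char) : 0 ≤ digitSum cs := by
  induction cs with
  | nil => simp [digitSum]
  | cons c l ih =>
    rw [digitSum_cons]
    exact add_nonneg (pyDigitInt_nonneg c) ih

theorem pyDigitInt_digitChar (d : Nat) (h : d < 10) :
    pyDigitInt (Nat.digitChar d) = (d : Int) := by
  interval_cases d <;> decide

-- mathematical digit sum of a natural number (proof-side abstraction shared by both ports'
-- termination arguments)
def digitSumNat (m : Nat) : Nat :=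
  if h : m = 0 then 0 else m % 10 + digitSumNat (m / 10)
termination_by m
decreasing_by exact Nat.div_lt_self (Nat.pos_of_ne_zero h) (by norm_num)

theorem digitSumNat_le (m : Nat) : digitSumNat m ≤ m := by
  induction m using Nat.strong_induction_on with
  | _ m ih =>
    rw [digitSumNat]
    split
    · omega
    · rename_i h
      have h1 := ih (m / 10) (Nat.div_lt_self (Nat.pos_of_ne_zero h) (by norm_num))
      omega

theorem digitSumNat_lt (m : Nat) (h : 10 ≤ m) : digitSumNat m < m := by
  rw [digitSumNat]
  split
  · omega
  · have h1 := digitSumNat_le (m / 10)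
    omega

theorem digitSumNat_ne (m : Nat) (h : m ≠ 0) :
    digitSumNat m = m % 10 + digitSumNat (m / 10) := by
  rw [digitSumNat]
  simp [h]

theorem digitSumNat_zero : digitSumNat 0 = 0 := by
  rw [digitSumNat]
  simp

theorem digitSumNat_of_lt10 (m : Nat) (h : m < 10) : digitSumNat m = m := by
  by_cases h0 : m = 0
  · rw [h0, digitSumNat_zero]
  · rw [digitSumNat_ne m h0, show m / 10 = 0 by omega, digitSumNat_zero]
    omega

theorem toDigitsCore_digitSum (fuel : Nat) : ∀ (n : Nat) (ds : List Char), n < fuel →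
    digitSum (Nat.toDigitsCore 10 fuel n ds) = (digitSumNat n : Int) + digitSum ds := by
  induction fuel with
  | zero => intro n ds h; omega
  | succ fuel ih =>
    intro n ds h
    simp only [Nat.toDigitsCore]
    split
    · rename_i h0
      rw [digitSum_cons, pyDigitInt_digitChar (n % 10) (by omega)]
      have hlt : n < 10 := by omega
      rw [digitSumNat_of_lt10 n hlt]
      have : n % 10 = n := by omega
      rw [this]
    · rename_i h0
      have hn : n ≠ 0 := by omega
      have hrec : n / 10 < fuel := by
        have := Nat.div_lt_self (Nat.pos_of_ne_zero hn) (show 1 < 10 by norm_num)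
        omega
      rw [ih (n / 10) _ hrec]
      rw [digitSum_cons, pyDigitInt_digitChar (n % 10) (by omega)]
      rw [digitSumNat_ne n hn]
      push_cast
      ring

theorem toChars_nat (m : Nat) : PySem.Int.toChars (m : Int) = Nat.toDigits 10 m := by
  simp [PySem.Int.toChars]

theorem digitSum_toChars (m : Nat) :
    digitSum (PySem.Int.toChars (m : Int)) = (digitSumNat m : Int) := by
  rw [toChars_nat]
  unfold Nat.toDigits
  rw [toDigitsCore_digitSum (m + 1) m [] (by omega)]
  simp [digitSum]

theorem toChars_length_lt10 (m : Nat) (h : m < 10) :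
    (PySem.Int.toChars (m : Int)).length = 1 := by
  interval_cases m <;> decide

-- termination lemma for port A, cited by name in decreasing_by (keeps the definition small)
theorem addative_dec (num : String) (h : 2 ≤ PySem.Str.len num) :
    Prod.Lex (· < ·) (· < ·)
      ((digitSum (PySem.Int.toStr (digitSum num.toList)).toList).toNat,
        (PySem.Int.toStr (digitSum num.toList)).toList.length)
      ((digitSum num.toList).toNat, num.toList.length) := by
  have hnn := digitSum_nonneg num.toList
  have hm : digitSum num.toList = (((digitSum num.toList).toNat : Nat) : Int) :=
    (Int.toNat_of_nonneg hnn).symm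
  rw [PySem.Str.len_eq] at h
  by_cases h10 : 10 ≤ (digitSum num.toList).toNat
  · apply Prod.Lex.left
    rw [PySem.Int.toList_toStr, hm, digitSum_toChars]
    have := digitSumNat_lt _ h10
    omega
  · have heq : (digitSum (PySem.Int.toStr (digitSum num.toList)).toList).toNat
        = (digitSum num.toList).toNat := by
      rw [PySem.Int.toList_toStr, hm, digitSum_toChars]
      rw [digitSumNat_of_lt10 _ (by omega)]
    rw [heq]
    apply Prod.Lex.right
    have hlen : (PySem.Int.toStr (digitSum num.toList)).toList.length = 1 := by
      rw [PySem.Int.toList_toStr, hm]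
      exact toChars_length_lt10 _ (by omega)
    rw [hlen]
    omega

-- port of A: `if len(num) >= 2: new = sum of int(i); return 1 + addative(str(new)) else return 0`
def addative (num : String) : Int :=
  if h : 2 ≤ PySem.Str.len num then
    1 + addative (PySem.Int.toStr (digitSum num.toList))
  else 0
termination_by ((digitSum num.toList).toNat, num.toList.length)
decreasing_by exact addative_dec num h

-- ===== PORT B =====
-- `_DIGITS = "0123456789"` and `_DIGITS.index(c)`; the `none` (ValueError) case is excluded
-- by Pre_addative.
def digitVal (c : Char) : Int :=
  (((PySem.List.index? ['0','1','2','3','4','5','6','7','8','9'] c).getD 0 : Nat) : Int)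

-- `total = 0; for c in num: total += _DIGITS.index(c)`
def valSum (cs : List Char) : Int := cs.foldl (fun acc c => acc + digitVal c) 0

-- termination lemma for the inner loop, cited by name in decreasing_by
theorem dsumLoop_dec (total : Int) (h : 0 < total) :
    (PySem.Int.floordiv total 10).toNat < total.toNat := by
  have hm : total = ((total.toNat : Nat) : Int) := (Int.toNat_of_nonneg (by omega)).symm
  have hfd : PySem.Int.floordiv ((total.toNat : Nat) : Int) 10 = ((total.toNat / 10 : Nat) : Int) := by
    exact_mod_cast PySem.Int.floordiv_natCast total.toNat 10
  rw [hm, hfd]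
  have : total.toNat / 10 < total.toNat := Nat.div_lt_self (by omega) (by norm_num)
  omega

-- inner loop: `s = 0; while total > 0: s += total % 10; total //= 10`
def dsumLoop (total s : Int) : Int :=
  if _h : 0 < total then dsumLoop (PySem.Int.floordiv total 10) (s + PySem.Int.mod total 10)
  else s
termination_by total.toNat
decreasing_by exact dsumLoop_dec total _h

theorem dsumLoop_eq (m : Nat) (s : Int) :
    dsumLoop (m : Int) s = s + (digitSumNat m : Int) := by
  induction m using Nat.strong_induction_on generalizing s with
  | _ m ih =>
    rw [dsumLoop]
    by_cases h0 : 0 < m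
    · rw [dif_pos (by exact_mod_cast h0)]
      have hfd : PySem.Int.floordiv ((m : Nat) : Int) 10 = ((m / 10 : Nat) : Int) := by
        exact_mod_cast PySem.Int.floordiv_natCast m 10
      have hmd : PySem.Int.mod ((m : Nat) : Int) 10 = ((m % 10 : Nat) : Int) := by
        exact_mod_cast PySem.Int.mod_natCast m 10
      rw [hfd, hmd]
      rw [ih (m / 10) (Nat.div_lt_self h0 (by norm_num))]
      rw [digitSumNat_ne m (by omega)]
      push_cast
      ring
    · rw [dif_neg (by exact_mod_cast h0)]
      have : m = 0 := by omega
      rw [this, digitSumNat_zero]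
      simp

-- termination lemma for the outer loop, cited by name in decreasing_by
theorem persCount_dec (total : Int) (h : 10 ≤ total) :
    (dsumLoop total 0).toNat < total.toNat := by
  have hm : total = ((total.toNat : Nat) : Int) := (Int.toNat_of_nonneg (by omega)).symm
  rw [hm, dsumLoop_eq]
  have := digitSumNat_lt total.toNat (by omega)
  omega

-- outer loop: `while total >= 10: total = <inner loop>; count += 1`
def persCount (total : Int) (count : Int) : Int :=
  if h : 10 ≤ total then persCount (dsumLoop total 0) (count + 1) else count
termination_by total.toNat
decreasing_by exact persCount_dec total h

def addative_alt (num : String) : Int :=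
  if PySem.Str.len num < 2 then 0
  else persCount (valSum num.toList) 1

-- ===== PRECONDITION & SPEC =====
-- Pre_ excludes exactly the strings of length >= 2 containing a non-digit character: there
-- Python's int(i) raises ValueError.
def Pre_addative (num : String) : Prop :=
  PySem.Str.len num < 2 ∨ PySem.Str.strIsdigit num = true
instance (num : String) : Decidable (Pre_addative num) := by unfold Pre_addative; infer_instance
def pvWitness_addative : String := "199"

def Spec_addative (num : String) (out : Int) : Prop := out = addative_alt num
instance (num : String) (out : Int) : Decidable (Spec_addative num out) := by unfold Spec_addative; infer_instance

-- ===== CLAIM (what is proved, stated in full; the proofs are below) =====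
def Claim_equal_addative : Prop := ∀ (num : String), Dom_addative num → Pre_addative num → Spec_addative num (addative num)

-- ===== LEMMAS AND PROOFS =====
theorem isdigit_bounds (c : Char) (h : PySem.Chars.isdigit c = true) :
    48 ≤ c.toNat ∧ c.toNat ≤ 57 := by
  simp [PySem.Chars.isdigit] at h
  exact ⟨h.1, h.2⟩

theorem char_eq_of_toNat (c d : Char) (h : c.toNat = d.toNat) : c = d :=
  Char.ext (UInt32.toNat_inj.mp h)

theorem digitVal_eq_pyDigitInt (c : Char) (h : PySem.Chars.isdigit c = true) :
    digitVal c = pyDigitInt c := by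
  obtain ⟨h1, h2⟩ := isdigit_bounds c h
  have hc : c.toNat = 48 ∨ c.toNat = 49 ∨ c.toNat = 50 ∨ c.toNat = 51 ∨ c.toNat = 52 ∨
      c.toNat = 53 ∨ c.toNat = 54 ∨ c.toNat = 55 ∨ c.toNat = 56 ∨ c.toNat = 57 := by omega
  rcases hc with hn|hn|hn|hn|hn|hn|hn|hn|hn|hn <;>
  [ rw [char_eq_of_toNat c '0' (by rw [hn]; rfl)];
    rw [char_eq_of_toNat c '1' (by rw [hn]; rfl)];
    rw [char_eq_of_toNat c '2' (by rw [hn]; rfl)];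
    rw [char_eq_of_toNat c '3' (by rw [hn]; rfl)];
    rw [char_eq_of_toNat c '4' (by rw [hn]; rfl)];
    rw [char_eq_of_toNat c '5' (by rw [hn]; rfl)];
    rw [char_eq_of_toNat c '6' (by rw [hn]; rfl)];
    rw [char_eq_of_toNat c '7' (by rw [hn]; rfl)];
    rw [char_eq_of_toNat c '8' (by rw [hn]; rfl)];
    rw [char_eq_of_toNat c '9' (by rw [hn]; rfl)] ] <;> decide

theorem valSum_eq_digitSum (cs : List Char) (h : ∀ c ∈ cs, PySem.Chars.isdigit c = true) :
    valSum cs = digitSum cs := by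
  unfold valSum digitSum
  apply PySem.List.foldl_congr_mem
  intro a c hc
  rw [digitVal_eq_pyDigitInt c (h c hc)]

theorem toDigitsCore_length (fuel : Nat) : ∀ (n : Nat) (ds : List Char), n < fuel →
    ds.length < (Nat.toDigitsCore 10 fuel n ds).length := by
  induction fuel with
  | zero => intro n ds h; omega
  | succ fuel ih =>
    intro n ds h
    simp only [Nat.toDigitsCore]
    split
    · simp
    · rename_i h0
      have hn : n ≠ 0 := by omega
      have hrec : n / 10 < fuel := by
        have := Nat.div_lt_self (Nat.pos_of_ne_zero hn) (show 1 < 10 by norm_num)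
        omega
      have := ih (n / 10) ((n % 10).digitChar :: ds) hrec
      simp at this
      omega

theorem toChars_length_ge (m : Nat) (h : 10 ≤ m) :
    2 ≤ (PySem.Int.toChars (m : Int)).length := by
  rw [toChars_nat]
  unfold Nat.toDigits
  have hne : ¬ m / 10 = 0 := by omega
  simp only [Nat.toDigitsCore, hne, if_false]
  have hrec : m / 10 < m := Nat.div_lt_self (by omega) (by norm_num)
  have := toDigitsCore_length m (m / 10) [(m % 10).digitChar] hrec
  simp at this
  omega

theorem persCount_eq (m : Nat) : ∀ c : Int,
    persCount (m : Int) c = c + addative (PySem.Int.toStr (m : Int)) := by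
  induction m using Nat.strong_induction_on with
  | _ m ih =>
    intro c
    by_cases h10 : 10 ≤ m
    · have hA : addative (PySem.Int.toStr (m : Int))
          = 1 + addative (PySem.Int.toStr ((digitSumNat m : Nat) : Int)) := by
        rw [addative]
        rw [dif_pos (by
          rw [PySem.Str.len_eq, PySem.Int.toList_toStr]
          exact_mod_cast toChars_length_ge m h10)]
        rw [PySem.Int.toList_toStr, digitSum_toChars]
      rw [persCount]
      rw [dif_pos (by exact_mod_cast h10)]
      rw [dsumLoop_eq m 0, zero_add]
      rw [ih (digitSumNat m) (digitSumNat_lt m h10) (c + 1), hA]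
      ring
    · rw [persCount]
      rw [dif_neg (by exact_mod_cast h10)]
      rw [addative]
      rw [dif_neg (by
        rw [PySem.Str.len_eq, PySem.Int.toList_toStr]
        rw [toChars_length_lt10 m (by omega)]
        norm_num)]
      ring

-- ===== VERDICT (by name: the statement is the Claim_ definition above) =====
theorem addative_spec : Claim_equal_addative := by
  intro num _hdom hpre
  unfold Spec_addative addative_alt
  by_cases h : 2 ≤ PySem.Str.len num
  · rw [if_neg (by omega)]
    have hdig : ∀ c ∈ num.toList, PySem.Chars.isdigit c = true := by
      rcases hpre with hl | hd
      · omega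
      · intro c hc
        simp [PySem.Str.strIsdigit, PySem.Chars.strIsdigit, List.all_eq_true] at hd
        exact hd.2 c hc
    rw [valSum_eq_digitSum num.toList hdig]
    rw [addative, dif_pos h]
    have hnn := digitSum_nonneg num.toList
    have hm : digitSum num.toList = (((digitSum num.toList).toNat : Nat) : Int) :=
      (Int.toNat_of_nonneg hnn).symm
    rw [hm, persCount_eq]
  · rw [addative, dif_neg h, if_pos (by omega)]
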